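-- pv_equiv track=rewrite | github.com/pypi-data/pypi-mirror-28 | packages/workshop-toolchain/workshop-toolchain-3.0.0.tar.gz/workshop-toolchain-3.0.0/gf/dash/dashboard_printer.py | first_row_table_input
-- ===== SOURCE A (Python) =====
-- def first_row_table_input(ws_exercises):
--     method_list = ["exercises"]
--     table_input = []
--     for index, task in enumerate(ws_exercises):
--         for method in ws_exercises[task]:
--             if method != "test_path":
--                 if index == 0:
--                     method_list.append(method)
--     table_input.append(method_list)
--     return table_input
-- ===== SOURCE B (Python) =====
-- def first_row_table_input(ws_exercises):
--     first = next(iter(ws_exercises), None)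
--     methods = [] if first is None else [m for m in ws_exercises[first] if m != "test_path"]
--     return [["exercises"] + methods]
-- ===== Notes on version B (the rewrite author's own statement) =====
-- stated objective: simpler
-- what changed: B reads the methods directly from the first task via next(iter(...)) and a single comprehension, instead of A's nested loop over every task guarded by index == 0.
import Mathlib
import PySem

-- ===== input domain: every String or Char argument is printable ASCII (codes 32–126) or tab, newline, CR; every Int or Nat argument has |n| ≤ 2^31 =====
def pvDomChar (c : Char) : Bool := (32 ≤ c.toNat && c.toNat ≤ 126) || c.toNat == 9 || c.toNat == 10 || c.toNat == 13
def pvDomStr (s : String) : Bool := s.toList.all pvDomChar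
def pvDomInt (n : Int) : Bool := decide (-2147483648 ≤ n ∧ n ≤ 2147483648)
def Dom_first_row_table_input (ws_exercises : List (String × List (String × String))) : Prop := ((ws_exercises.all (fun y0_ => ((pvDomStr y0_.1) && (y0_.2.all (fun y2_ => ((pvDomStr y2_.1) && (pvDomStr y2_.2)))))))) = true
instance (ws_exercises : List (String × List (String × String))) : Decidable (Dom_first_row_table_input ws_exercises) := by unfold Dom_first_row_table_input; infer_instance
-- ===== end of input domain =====

-- B builds the header directly from the first task's keys (one pass) instead of A's
-- nested loop over all tasks guarded by index == 0; same return value, simpler shape.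
-- ===== PORT A =====
-- Python: ws_exercises[task] — dict lookup = first match in the association list.
-- The key always comes from the list itself, so the lookup never misses; getD [] is unreachable.
def first_row_table_input (ws_exercises : List (String × List (String × String))) : List (List String) :=
  let method_list : List String :=
    (PySem.List.enumerate ws_exercises 0).foldl
      (fun ml p =>
        ((PySem.Dict.get? (PySem.Dict.mk ws_exercises) p.2.1).getD []).foldl
          (fun ml2 m =>
            if m.1 ≠ "test_path" then
              if p.1 = 0 then ml2 ++ [m.1] else ml2
            else ml2)
          ml)
      ["exercises"]
  [method_list]

-- ===== PORT B =====
def first_row_table_input_alt (ws_exercises : List (String × List (String × String))) : List (List String) :=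
  let methods : List String :=
    match ws_exercises with
    | [] => []
    | (_first, ms) :: _ => (ms.map Prod.fst).filter (fun m => m ≠ "test_path")
  [["exercises"] ++ methods]

-- ===== PRECONDITION & SPEC =====
def Spec_first_row_table_input (ws_exercises : List (String × List (String × String))) (out : List (List String)) : Prop := out = first_row_table_input_alt ws_exercises
instance (ws_exercises : List (String × List (String × String))) (out : List (List String)) : Decidable (Spec_first_row_table_input ws_exercises out) := by unfold Spec_first_row_table_input; infer_instance

-- ===== CLAIM (what is proved, stated in full; the proofs are below) =====
def Claim_equal_first_row_table_input : Prop := ∀ (ws_exercises : List (String × List (String × String))), Dom_first_row_table_input ws_exercises → Spec_first_row_table_input ws_exercises (first_row_table_input ws_exercises)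

-- ===== LEMMAS AND PROOFS =====

-- the inner loop with index 0 appends the filtered keys
theorem pv_inner_zero (ms : List (String × String)) (ml : List String) :
    ms.foldl (fun ml2 m => if m.1 ≠ "test_path" then ml2 ++ [m.1] else ml2) ml
      = ml ++ (ms.map Prod.fst).filter (fun m => m ≠ "test_path") := by
  induction ms generalizing ml with
  | nil => simp
  | cons h t ih =>
    rw [List.foldl_cons]
    by_cases hb : h.1 = "test_path"
    · rw [if_neg (by simp [hb]), ih]; simp [hb]
    · rw [if_pos (by simp [hb]), ih]; simp [hb, List.append_assoc]

-- the inner loop with a nonzero index is the identity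
theorem pv_inner_nz (ms : List (String × String)) (ml : List String) (i : Int) (hi : i ≠ 0) :
    ms.foldl (fun ml2 m => if m.1 ≠ "test_path" then (if i = 0 then ml2 ++ [m.1] else ml2) else ml2) ml = ml := by
  induction ms generalizing ml with
  | nil => rfl
  | cons h t ih =>
    have hstep : (if h.1 ≠ "test_path" then (if i = 0 then ml ++ [h.1] else ml) else ml) = ml := by
      split_ifs <;> simp_all
    rw [List.foldl_cons, hstep]; exact ih ml

-- the outer loop over entries enumerated from a positive start changes nothing
theorem pv_outer_pos (ws : List (String × List (String × String)))
    (rest : List (String × List (String × String))) (s : Int) (hs : 1 ≤ s) (ml : List String) :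
    (PySem.List.enumerate rest s).foldl
      (fun ml p =>
        ((PySem.Dict.get? (PySem.Dict.mk ws) p.2.1).getD []).foldl
          (fun ml2 m => if m.1 ≠ "test_path" then (if p.1 = 0 then ml2 ++ [m.1] else ml2) else ml2) ml) ml
      = ml := by
  induction rest generalizing s ml with
  | nil => rfl
  | cons h t ih =>
    rw [PySem.List.enumerate_cons]
    simp only [List.foldl]
    rw [pv_inner_nz _ _ s (by omega)]
    exact ih (s + 1) (by omega) ml

-- ===== VERDICT (by name: the statement is the Claim_ definition above) =====
theorem first_row_table_input_spec : Claim_equal_first_row_table_input := by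
  intro ws _
  unfold Spec_first_row_table_input first_row_table_input first_row_table_input_alt
  cases ws with
  | nil => rfl
  | cons h t =>
    obtain ⟨k, ms⟩ := h
    rw [PySem.List.enumerate_cons]
    rw [List.foldl_cons]
    simp only [if_true]
    rw [show PySem.Dict.get? (PySem.Dict.mk ((k, ms) :: t)) k = some ms by
          simp [PySem.Dict.get?_mk_cons]]
    simp only [Option.getD_some]
    rw [pv_inner_zero, pv_outer_pos _ _ _ (by omega)]
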